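-- pv_equiv track=rewrite | github.com/sghoregooteitehoo03/AlgorithmStudy | 문제풀이/programmers/fully_search/Q_2.py | solution
-- ===== SOURCE A (Python) =====
-- def solution(answers):
--     answer = []
--     person_1 = [1, 2, 3, 4, 5] * (len(answers) + 1)
--     person_2 = [2, 1, 2, 3, 2, 4, 2, 5] * (len(answers) + 1)
--     person_3 = [3, 3, 1, 1, 2, 2, 4, 4, 5, 5] * (len(answers) + 1)
--
--     person1_count = 0
--     person2_count = 0
--     person3_count = 0
--
--     for i in range(len(answers)):
--         number = answers[i]
--
--         if person_1[i] == number: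
--             person1_count += 1
--
--         if person_2[i] == number:
--             person2_count += 1
--
--         if person_3[i] == number:
--             person3_count += 1
--
--     max_value = max(person1_count, person2_count, person3_count)
--
--     if person1_count == max_value:
--         answer.append(1)
--
--     if person2_count == max_value:
--         answer.append(2)
--
--     if person3_count == max_value:
--         answer.append(3)
--
--     return answer
-- ===== SOURCE B (Python) =====
-- def solution(answers):
--     # One pass builds a histogram keyed by (position mod 40, answer); 40 = lcm(5, 8, 10),
--     # so each score is then a sum of 40 histogram lookups -- no per-pattern rescans of answers.
--     hist = {}
--     for i, a in enumerate(answers):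
--         k = (i % 40, a)
--         hist[k] = hist.get(k, 0) + 1
--     patterns = [[1, 2, 3, 4, 5],
--                 [2, 1, 2, 3, 2, 4, 2, 5],
--                 [3, 3, 1, 1, 2, 2, 4, 4, 5, 5]]
--     counts = []
--     for pat in patterns:
--         c = 0
--         for r in range(40):
--             c += hist.get((r, pat[r % len(pat)]), 0)
--         counts.append(c)
--     best = max(counts)
--     return [j + 1 for j, c in enumerate(counts) if c == best]
-- ===== Notes on version B (the rewrite author's own statement) =====
-- stated objective: alternative
-- what changed: Replaces A's one pass comparing each answer against three materialized tiled guess lists with three counters by a histogram algorithm: one pass builds a dict counting (position mod 40, answer) pairs (40 = lcm of the pattern periods 5, 8, 10), and each guesser's score is then computed without touching answers again, as a sum of 40 histogram lookups against that guesser's value at each residue.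
import Mathlib
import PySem

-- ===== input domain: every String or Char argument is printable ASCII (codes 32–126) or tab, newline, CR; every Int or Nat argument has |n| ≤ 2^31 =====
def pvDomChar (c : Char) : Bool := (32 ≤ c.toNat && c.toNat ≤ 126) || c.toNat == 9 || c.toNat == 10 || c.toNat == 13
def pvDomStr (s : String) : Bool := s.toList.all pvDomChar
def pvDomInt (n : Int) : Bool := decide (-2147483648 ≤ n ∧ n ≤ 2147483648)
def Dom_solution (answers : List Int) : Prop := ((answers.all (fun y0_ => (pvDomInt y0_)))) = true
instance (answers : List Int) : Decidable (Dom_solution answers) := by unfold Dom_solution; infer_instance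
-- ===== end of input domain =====

-- B replaces A's pass comparing answers against three tiled guess lists by a histogram of
-- (position mod 40, answer) pairs, from which each guesser's score is a sum of 40 lookups;
-- objective: alternative (same asymptotic cost, different algorithm).

-- ===== PORT A =====
def solution (answers : List Int) : List Int :=
  let person_1 := PySem.List.pyRepeat [1, 2, 3, 4, 5] ((answers.length : Int) + 1)
  let person_2 := PySem.List.pyRepeat [2, 1, 2, 3, 2, 4, 2, 5] ((answers.length : Int) + 1)
  let person_3 := PySem.List.pyRepeat [3, 3, 1, 1, 2, 2, 4, 4, 5, 5] ((answers.length : Int) + 1)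
  let counts :=
    (PySem.List.pyRange 0 (answers.length : Int) 1).foldl
      (fun (c : Int × Int × Int) i =>
        -- answers[i] and person_k[i]: i ranges over range(len(answers)), always in range
        let number := PySem.List.pyGetD answers i 0
        (if PySem.List.pyGetD person_1 i 0 = number then c.1 + 1 else c.1,
         if PySem.List.pyGetD person_2 i 0 = number then c.2.1 + 1 else c.2.1,
         if PySem.List.pyGetD person_3 i 0 = number then c.2.2 + 1 else c.2.2))
      (0, 0, 0)
  let max_value := max counts.1 (max counts.2.1 counts.2.2)
  let answer1 := if counts.1 = max_value then ([] : List Int) ++ [1] else []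
  let answer2 := if counts.2.1 = max_value then answer1 ++ [2] else answer1
  if counts.2.2 = max_value then answer2 ++ [3] else answer2

-- ===== PORT B =====
-- the histogram keys produced by B's first loop: (i % 40, answers[i]) in order
def histKeys (answers : List Int) : List (Int × Int) :=
  (PySem.List.enumerate answers).map (fun p => (PySem.Int.mod p.1 40, p.2))

-- 'for r in range(40): c += hist.get((r, pat[r % len(pat)]), 0)'  (pat[...] always in range)
def patScore (hist : PySem.Dict (Int × Int) Int) (pat : List Int) : Int :=
  (PySem.List.pyRange 0 40 1).foldl
    (fun c r => c + hist.getD (r, PySem.List.pyGetD pat (PySem.Int.mod r (pat.length : Int)) 0) 0) 0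

def solution_alt (answers : List Int) : List Int :=
  -- 'hist[k] = hist.get(k, 0) + 1' over the keys (i % 40, a) is a Counter of those keys
  let hist := PySem.Dict.counter (histKeys answers)
  let patterns : List (List Int) :=
    [[1, 2, 3, 4, 5], [2, 1, 2, 3, 2, 4, 2, 5], [3, 3, 1, 1, 2, 2, 4, 4, 5, 5]]
  let counts := patterns.foldl (fun acc pat => acc ++ [patScore hist pat]) []
  let best := (PySem.List.max? counts (fun x => x)).getD 0   -- counts has 3 elements, max never sees []
  (PySem.List.enumerate counts).filterMap (fun p => if p.2 = best then some (p.1 + 1) else none)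

-- ===== PRECONDITION & SPEC =====
def Spec_solution (answers : List Int) (out : List Int) : Prop := out = solution_alt answers
instance (answers : List Int) (out : List Int) : Decidable (Spec_solution answers out) := by unfold Spec_solution; infer_instance

-- ===== CLAIM (what is proved, stated in full; the proofs are below) =====
def Claim_equal_solution : Prop := ∀ (answers : List Int), Dom_solution answers → Spec_solution answers (solution answers)

-- ===== LEMMAS AND PROOFS =====

-- the common value both sides are reduced to: matches of answers[i] against pat[i % len(pat)]
def matchCount (pat answers : List Int) : Int :=
  ((PySem.List.enumerate answers).countP
      (fun p => p.2 == PySem.List.pyGetD pat (PySem.Int.mod p.1 (pat.length : Int)) 0) : Int)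

-- indexing into the repeated list is cyclic indexing into the base pattern
theorem pyGetD_pyRepeat (pat : List Int) (k : Nat) (i : Int) (h0 : 0 ≤ i)
    (h : i < (k : Int) * (pat.length : Int)) :
    PySem.List.pyGetD (PySem.List.pyRepeat pat (k : Int)) i 0 =
      PySem.List.pyGetD pat (PySem.Int.mod i (pat.length : Int)) 0 := by
  induction k generalizing i with
  | zero => simp at h; omega
  | succ k ih =>
    have hp : 0 < pat.length := by
      rcases Nat.eq_zero_or_pos pat.length with h0' | h0'
      · simp [h0'] at h; omega
      · exact h0'
    have hsplit : PySem.List.pyRepeat pat ((k + 1 : Nat) : Int) =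
        pat ++ PySem.List.pyRepeat pat (k : Int) := by
      simp [PySem.List.pyRepeat, List.replicate_succ]
    rw [hsplit]
    have hmod := PySem.Int.mod_eq_emod_of_pos (a := i) (b := (pat.length : Int)) (by exact_mod_cast hp)
    by_cases hi : i < (pat.length : Int)
    · rw [hmod, Int.emod_eq_of_lt h0 hi]
      rw [PySem.List.pyGetD_eq_getElem _ _ h0 (by simp; push_cast at h ⊢; omega),
          PySem.List.pyGetD_eq_getElem _ _ h0 (by exact_mod_cast hi)]
      rw [List.getElem_append_left]
    · push Not at hi
      have hlen2 : i - (pat.length : Int) < (k : Int) * (pat.length : Int) := by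
        push_cast at h ⊢; nlinarith
      have := ih (i - (pat.length : Int)) (by omega) hlen2
      have hmod2 := PySem.Int.mod_eq_emod_of_pos (a := i - (pat.length : Int))
        (b := (pat.length : Int)) (by exact_mod_cast hp)
      rw [hmod2, Int.sub_emod_right, ← hmod] at this
      rw [← this]
      rw [PySem.List.pyGetD_eq_getElem _ _ h0
            (by simp [PySem.List.pyRepeat]; push_cast at h ⊢; omega),
          PySem.List.pyGetD_eq_getElem _ _ (by omega)
            (by simp [PySem.List.pyRepeat]; push_cast at h ⊢; omega)]
      rw [List.getElem_append_right (by omega)]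
      congr 1
      omega

-- A's per-person counting loop computes the cyclic match count
theorem fold_eq_matchCount (pat answers : List Int) (hp : 0 < pat.length) :
    (PySem.List.pyRange 0 (answers.length : Int) 1).foldl
      (fun (c : Int) i =>
        if PySem.List.pyGetD (PySem.List.pyRepeat pat ((answers.length : Int) + 1)) i 0 =
            PySem.List.pyGetD answers i 0 then c + 1 else c) 0
      = matchCount pat answers := by
  have hq :
      (PySem.List.pyRange 0 (answers.length : Int) 1).foldl
        (fun (c : Int) i =>
          if PySem.List.pyGetD (PySem.List.pyRepeat pat ((answers.length : Int) + 1)) i 0 =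
              PySem.List.pyGetD answers i 0 then c + 1 else c) 0
      = (PySem.List.pyRange 0 (answers.length : Int) 1).foldl
        (fun (c : Int) i =>
          if (PySem.List.pyGetD answers i 0 ==
              PySem.List.pyGetD pat (PySem.Int.mod i (pat.length : Int)) 0) = true
          then c + 1 else c) 0 := by
    apply PySem.List.foldl_congr_mem'
    intro i hi acc
    have hmem := PySem.List.mem_pyRange_one.mp hi
    have hcast : ((answers.length : Int) + 1) = ((answers.length + 1 : Nat) : Int) := by push_cast; ring
    have hbound : i < ((answers.length + 1 : Nat) : Int) * (pat.length : Int) := by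
      push_cast; nlinarith [hmem.1, hmem.2, hp]
    rw [hcast, pyGetD_pyRepeat pat (answers.length + 1) i hmem.1 hbound]
    by_cases hEq : PySem.List.pyGetD pat (PySem.Int.mod i (pat.length : Int)) 0 =
        PySem.List.pyGetD answers i 0
    · simp [hEq]
    · simp [hEq, Ne.symm hEq]
  rw [hq, PySem.List.foldl_count_if]
  unfold matchCount
  rw [PySem.List.enumerate_eq_map_pyRange answers 0, List.countP_map]
  simp only [PySem.List.len, zero_add]
  rfl

-- the indicator sum over a list not containing x vanishes
theorem sum_map_indicator_zero (R : List Int) (x : Int) (hx : x ∉ R) (g : Int → Int) :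
    (R.map (fun r => if r = x then g r else 0)).sum = 0 := by
  apply List.sum_eq_zero
  intro y hy
  simp only [List.mem_map] at hy
  obtain ⟨r, hr, rfl⟩ := hy
  have : r ≠ x := fun h => hx (h ▸ hr)
  simp [this]

-- summing an indicator over a list containing x exactly once picks out g x
theorem sum_map_indicator (R : List Int) (x : Int) (hx : List.count x R = 1) (g : Int → Int) :
    (R.map (fun r => if r = x then g r else 0)).sum = g x := by
  induction R with
  | nil => simp at hx
  | cons a R ih =>
    rw [List.count_cons] at hx
    by_cases h : a = x
    · subst h
      simp only [beq_self_eq_true, if_true] at hx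
      have h0 : List.count a R = 0 := by omega
      have hnot : a ∉ R := List.count_eq_zero.mp h0
      simp [sum_map_indicator_zero R a hnot g]
    · have : (a == x) = false := by simp [h]
      rw [this] at hx; simp at hx
      simp [h, ih hx]

-- a sum of per-residue counts over 0..39 is a single countP, when all keys' residues lie in 0..39
theorem count_sum_eq_countP (f : Int → Int) (L : List (Int × Int))
    (hL : ∀ p ∈ L, 0 ≤ p.1 ∧ p.1 < 40) :
    ((PySem.List.pyRange 0 40 1).map (fun r => ((List.count (r, f r) L : Nat) : Int))).sum
      = ((L.countP (fun p => p.2 == f p.1) : Nat) : Int) := by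
  induction L with
  | nil => simp
  | cons p L ih =>
    have hp := hL p (List.mem_cons_self)
    have hcnt1 : List.count p.1 (PySem.List.pyRange 0 40 1) = 1 :=
      List.count_eq_one_of_mem (by decide)
        (PySem.List.mem_pyRange_one.mpr ⟨hp.1, hp.2⟩)
    have hstep : ∀ r : Int, ((List.count (r, f r) (p :: L) : Nat) : Int)
        = ((List.count (r, f r) L : Nat) : Int)
          + (if r = p.1 then (if (p == (p.1, f r)) then (1:Int) else 0) else 0) := by
      intro r
      rw [List.count_cons]
      push_cast
      by_cases hr : r = p.1
      · subst hr; simp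
      · have : (p == (r, f r)) = false := by
          rcases p with ⟨p1, p2⟩
          simp_all [Prod.ext_iff]
          intro h; exact absurd h.symm hr
        simp [this, hr]
    calc ((PySem.List.pyRange 0 40 1).map
            (fun r => ((List.count (r, f r) (p :: L) : Nat) : Int))).sum
        = ((PySem.List.pyRange 0 40 1).map
            (fun r => ((List.count (r, f r) L : Nat) : Int)
              + (if r = p.1 then (if (p == (p.1, f r)) then (1:Int) else 0) else 0))).sum := by
          exact congrArg List.sum (List.map_congr_left (fun r _ => hstep r))
      _ = ((PySem.List.pyRange 0 40 1).map
            (fun r => ((List.count (r, f r) L : Nat) : Int))).sum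
          + ((PySem.List.pyRange 0 40 1).map
            (fun r => if r = p.1 then (if (p == (p.1, f r)) then (1:Int) else 0) else 0)).sum :=
          PySem.List.sum_map_add_int _ _ _
      _ = ((L.countP (fun p => p.2 == f p.1) : Nat) : Int)
          + (if (p == (p.1, f p.1)) then (1:Int) else 0) := by
          rw [ih (fun q hq => hL q (List.mem_cons_of_mem p hq)),
              sum_map_indicator _ _ hcnt1 (fun r => if (p == (p.1, f r)) then (1:Int) else 0)]
      _ = (((p :: L).countP (fun p => p.2 == f p.1) : Nat) : Int) := by
          rw [List.countP_cons]
          push_cast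
          rcases p with ⟨p1, p2⟩
          by_cases h : p2 = f p1 <;> simp [h]

-- B's 40-lookup score over the histogram is the cyclic match count
theorem patScore_eq (pat answers : List Int) (hpos : 0 < pat.length)
    (hdvd : (pat.length : Int) ∣ 40) :
    patScore (PySem.Dict.counter (histKeys answers)) pat = matchCount pat answers := by
  unfold patScore
  rw [PySem.List.foldl_add, zero_add]
  have hget : ∀ r : Int,
      (PySem.Dict.counter (histKeys answers)).getD
          (r, PySem.List.pyGetD pat (PySem.Int.mod r (pat.length : Int)) 0) 0
        = ((List.count (r, PySem.List.pyGetD pat (PySem.Int.mod r (pat.length : Int)) 0)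
              (histKeys answers) : Nat) : Int) :=
    fun r => PySem.Dict.getD_counter _ _
  rw [List.map_congr_left (fun r _ => hget r)]
  rw [count_sum_eq_countP (fun r => PySem.List.pyGetD pat (PySem.Int.mod r (pat.length : Int)) 0)
        (histKeys answers)
        (by
          intro p hp
          unfold histKeys at hp
          simp only [List.mem_map] at hp
          obtain ⟨q, _, rfl⟩ := hp
          exact ⟨PySem.Int.mod_nonneg _ (by norm_num), PySem.Int.mod_lt _ (by norm_num)⟩)]
  unfold histKeys matchCount
  rw [List.countP_map]
  congr 1
  apply List.countP_congr
  intro q hq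
  obtain ⟨k, hk, rfl⟩ := (PySem.List.mem_enumerate_iff answers 0 q).mp hq
  have h0 : (0:Int) ≤ 0 + (k : Int) := by omega
  have hplen : (0:Int) < (pat.length : Int) := by exact_mod_cast hpos
  have hmod40 : PySem.Int.mod (0 + (k : Int)) 40 = (0 + (k : Int)) % 40 :=
    PySem.Int.mod_eq_emod_of_pos (by norm_num)
  have hmodlen : ∀ a : Int, PySem.Int.mod a (pat.length : Int) = a % (pat.length : Int) :=
    fun a => PySem.Int.mod_eq_emod_of_pos hplen
  simp only [Function.comp]
  rw [hmod40, hmodlen, hmodlen, Int.emod_emod_of_dvd _ hdvd]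

-- the selection tail: max of three counters + conditional appends = enumerate/filter over [a,b,c]
def tailA (t : Int × Int × Int) : List Int :=
  let max_value := max t.1 (max t.2.1 t.2.2)
  let answer1 := if t.1 = max_value then ([] : List Int) ++ [1] else []
  let answer2 := if t.2.1 = max_value then answer1 ++ [2] else answer1
  if t.2.2 = max_value then answer2 ++ [3] else answer2

def tailB (t : Int × Int × Int) : List Int :=
  let counts : List Int := [t.1, t.2.1, t.2.2]
  let best := (PySem.List.max? counts (fun x => x)).getD 0
  (PySem.List.enumerate counts).filterMap (fun p => if p.2 = best then some (p.1 + 1) else none)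

theorem tail_eq (t : Int × Int × Int) : tailA t = tailB t := by
  obtain ⟨a, b, c⟩ := t
  unfold tailA tailB
  have hmax : (PySem.List.max? [a, b, c] (fun x => x)).getD 0 = max a (max b c) := by
    by_cases h1 : a < b <;> by_cases h2 : a < c <;> by_cases h3 : b < c <;>
      simp [PySem.List.max?, h1, h2, h3] <;> omega
  simp only [hmax, PySem.List.enumerate_cons, PySem.List.enumerate_nil, List.filterMap]
  generalize max a (max b c) = m
  by_cases ha : a = m <;> by_cases hb : b = m <;> by_cases hc : c = m <;>
    simp [ha, hb, hc]

-- A's counting loop computes the triple of cyclic match counts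
theorem counts_eq (answers : List Int) :
    (PySem.List.pyRange 0 (answers.length : Int) 1).foldl
      (fun (c : Int × Int × Int) i =>
        let number := PySem.List.pyGetD answers i 0
        (if PySem.List.pyGetD (PySem.List.pyRepeat [1, 2, 3, 4, 5] ((answers.length : Int) + 1)) i 0 = number then c.1 + 1 else c.1,
         if PySem.List.pyGetD (PySem.List.pyRepeat [2, 1, 2, 3, 2, 4, 2, 5] ((answers.length : Int) + 1)) i 0 = number then c.2.1 + 1 else c.2.1,
         if PySem.List.pyGetD (PySem.List.pyRepeat [3, 3, 1, 1, 2, 2, 4, 4, 5, 5] ((answers.length : Int) + 1)) i 0 = number then c.2.2 + 1 else c.2.2))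
      (0, 0, 0)
    = (matchCount [1, 2, 3, 4, 5] answers,
       matchCount [2, 1, 2, 3, 2, 4, 2, 5] answers,
       matchCount [3, 3, 1, 1, 2, 2, 4, 4, 5, 5] answers) := by
  have houter :
      (PySem.List.pyRange 0 (answers.length : Int) 1).foldl
        (fun (c : Int × Int × Int) i =>
          let number := PySem.List.pyGetD answers i 0
          (if PySem.List.pyGetD (PySem.List.pyRepeat [1, 2, 3, 4, 5] ((answers.length : Int) + 1)) i 0 = number then c.1 + 1 else c.1,
           if PySem.List.pyGetD (PySem.List.pyRepeat [2, 1, 2, 3, 2, 4, 2, 5] ((answers.length : Int) + 1)) i 0 = number then c.2.1 + 1 else c.2.1,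
           if PySem.List.pyGetD (PySem.List.pyRepeat [3, 3, 1, 1, 2, 2, 4, 4, 5, 5] ((answers.length : Int) + 1)) i 0 = number then c.2.2 + 1 else c.2.2))
        (0, 0, 0)
      = ((PySem.List.pyRange 0 (answers.length : Int) 1).foldl
           (fun (x : Int) i =>
             if PySem.List.pyGetD (PySem.List.pyRepeat [1, 2, 3, 4, 5] ((answers.length : Int) + 1)) i 0 =
                 PySem.List.pyGetD answers i 0 then x + 1 else x) 0,
         (PySem.List.pyRange 0 (answers.length : Int) 1).foldl
           (fun (t : Int × Int) i =>
             (if PySem.List.pyGetD (PySem.List.pyRepeat [2, 1, 2, 3, 2, 4, 2, 5] ((answers.length : Int) + 1)) i 0 =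
                  PySem.List.pyGetD answers i 0 then t.1 + 1 else t.1,
              if PySem.List.pyGetD (PySem.List.pyRepeat [3, 3, 1, 1, 2, 2, 4, 4, 5, 5] ((answers.length : Int) + 1)) i 0 =
                  PySem.List.pyGetD answers i 0 then t.2 + 1 else t.2)) (0, 0)) :=
    PySem.List.foldl_prod_mk (fun (x : Int) (i : Int) =>
         if PySem.List.pyGetD (PySem.List.pyRepeat [1, 2, 3, 4, 5] ((answers.length : Int) + 1)) i 0 =
             PySem.List.pyGetD answers i 0 then x + 1 else x)
      (fun (t : Int × Int) (i : Int) =>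
         (if PySem.List.pyGetD (PySem.List.pyRepeat [2, 1, 2, 3, 2, 4, 2, 5] ((answers.length : Int) + 1)) i 0 =
              PySem.List.pyGetD answers i 0 then t.1 + 1 else t.1,
          if PySem.List.pyGetD (PySem.List.pyRepeat [3, 3, 1, 1, 2, 2, 4, 4, 5, 5] ((answers.length : Int) + 1)) i 0 =
              PySem.List.pyGetD answers i 0 then t.2 + 1 else t.2))
      (PySem.List.pyRange 0 (answers.length : Int) 1) 0 (0, 0)
  have hinner :
      (PySem.List.pyRange 0 (answers.length : Int) 1).foldl
        (fun (t : Int × Int) i =>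
          (if PySem.List.pyGetD (PySem.List.pyRepeat [2, 1, 2, 3, 2, 4, 2, 5] ((answers.length : Int) + 1)) i 0 =
               PySem.List.pyGetD answers i 0 then t.1 + 1 else t.1,
           if PySem.List.pyGetD (PySem.List.pyRepeat [3, 3, 1, 1, 2, 2, 4, 4, 5, 5] ((answers.length : Int) + 1)) i 0 =
               PySem.List.pyGetD answers i 0 then t.2 + 1 else t.2)) (0, 0)
      = ((PySem.List.pyRange 0 (answers.length : Int) 1).foldl
           (fun (x : Int) i =>
             if PySem.List.pyGetD (PySem.List.pyRepeat [2, 1, 2, 3, 2, 4, 2, 5] ((answers.length : Int) + 1)) i 0 =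
                 PySem.List.pyGetD answers i 0 then x + 1 else x) 0,
         (PySem.List.pyRange 0 (answers.length : Int) 1).foldl
           (fun (x : Int) i =>
             if PySem.List.pyGetD (PySem.List.pyRepeat [3, 3, 1, 1, 2, 2, 4, 4, 5, 5] ((answers.length : Int) + 1)) i 0 =
                 PySem.List.pyGetD answers i 0 then x + 1 else x) 0) :=
    PySem.List.foldl_prod_mk (fun (x : Int) (i : Int) =>
         if PySem.List.pyGetD (PySem.List.pyRepeat [2, 1, 2, 3, 2, 4, 2, 5] ((answers.length : Int) + 1)) i 0 =
             PySem.List.pyGetD answers i 0 then x + 1 else x)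
      (fun (x : Int) (i : Int) =>
         if PySem.List.pyGetD (PySem.List.pyRepeat [3, 3, 1, 1, 2, 2, 4, 4, 5, 5] ((answers.length : Int) + 1)) i 0 =
             PySem.List.pyGetD answers i 0 then x + 1 else x)
      (PySem.List.pyRange 0 (answers.length : Int) 1) 0 0
  rw [houter, hinner,
      fold_eq_matchCount [1, 2, 3, 4, 5] answers (by decide),
      fold_eq_matchCount [2, 1, 2, 3, 2, 4, 2, 5] answers (by decide),
      fold_eq_matchCount [3, 3, 1, 1, 2, 2, 4, 4, 5, 5] answers (by decide)]

-- ===== VERDICT (by name: the statement is the Claim_ definition above) =====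
theorem solution_spec : Claim_equal_solution := by
  intro answers _
  show solution answers = solution_alt answers
  have hA : solution answers = tailA
      ((PySem.List.pyRange 0 (answers.length : Int) 1).foldl
        (fun (c : Int × Int × Int) i =>
          let number := PySem.List.pyGetD answers i 0
          (if PySem.List.pyGetD (PySem.List.pyRepeat [1, 2, 3, 4, 5] ((answers.length : Int) + 1)) i 0 = number then c.1 + 1 else c.1,
           if PySem.List.pyGetD (PySem.List.pyRepeat [2, 1, 2, 3, 2, 4, 2, 5] ((answers.length : Int) + 1)) i 0 = number then c.2.1 + 1 else c.2.1,
           if PySem.List.pyGetD (PySem.List.pyRepeat [3, 3, 1, 1, 2, 2, 4, 4, 5, 5] ((answers.length : Int) + 1)) i 0 = number then c.2.2 + 1 else c.2.2))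
        (0, 0, 0)) := rfl
  have hB : solution_alt answers = tailB
      (patScore (PySem.Dict.counter (histKeys answers)) [1, 2, 3, 4, 5],
       patScore (PySem.Dict.counter (histKeys answers)) [2, 1, 2, 3, 2, 4, 2, 5],
       patScore (PySem.Dict.counter (histKeys answers)) [3, 3, 1, 1, 2, 2, 4, 4, 5, 5]) := rfl
  rw [hA, hB, counts_eq answers,
      patScore_eq [1, 2, 3, 4, 5] answers (by decide) (by decide),
      patScore_eq [2, 1, 2, 3, 2, 4, 2, 5] answers (by decide) (by decide),
      patScore_eq [3, 3, 1, 1, 2, 2, 4, 4, 5, 5] answers (by decide) (by decide)]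
  exact tail_eq _
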